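-- pv_equiv track=rewrite | github.com/SreeLeelaManchala/geeksforgeeks | Difficulty: Easy/Last cell in a Matrix/last-cell-in-a-matrix.py | endPoints
-- ===== SOURCE A (Python) =====
-- def endPoints(matrix, R, C):
--     i=0
--     j=0
--     d=0
--     while (i>=0 and i<R and j>=0 and j<C):
--         if matrix[i][j]==1:
--             matrix[i][j]=0
--             d=(d+1)%4
--
--         if d==0:
--             j+=1
--         elif d==1:
--             i+=1
--         elif d==2:
--             j-=1
--         elif d==3:
--             i-=1
--     if d==0:
--         j-=1
--     elif d==1:
--         i-=1
--     elif d==2: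
--         j+=1
--     elif d==3:
--         i+=1
--
--     return (i,j)
-- ===== SOURCE B (Python) =====
-- def _first_ge(lst, x):
--     # first element >= x in an ascending list (None if none)
--     for v in lst:
--         if v >= x:
--             return v
--     return None
--
--
-- def _last_le(lst, x):
--     # last element <= x in an ascending list (None if none)
--     res = None
--     for v in lst:
--         if v > x:
--             break
--         res = v
--     return res
--
--
-- def endPoints(matrix, R, C):
--     # Index-list walk: instead of stepping cell by cell, precompute for every
--     # row the ascending list of columns holding a 1 and for every column the
--     # ascending list of rows holding a 1, then jump straight to the next 1 in
--     # the current direction; when none is ahead, the exit cell is the boundary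
--     # cell of that ray.  (Does not mutate `matrix`, unlike A.)
--     if R <= 0 or C <= 0:
--         return (0, -1)
--     rows = [[c for c in range(C) if matrix[r][c] == 1] for r in range(R)]
--     cols = [[r for r in range(R) if matrix[r][c] == 1] for c in range(C)]
--     i, j, d = 0, 0, 0
--     while True:
--         if d == 0:
--             t = _first_ge(rows[i], j)
--             if t is None:
--                 return (i, C - 1)
--             r, c = i, t
--         elif d == 1:
--             t = _first_ge(cols[j], i)
--             if t is None:
--                 return (R - 1, j)
--             r, c = t, j
--         elif d == 2:
--             t = _last_le(rows[i], j)
--             if t is None: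
--                 return (i, 0)
--             r, c = i, t
--         else:
--             t = _last_le(cols[j], i)
--             if t is None:
--                 return (0, j)
--             r, c = t, j
--         rows[r].remove(c)
--         cols[c].remove(r)
--         d = (d + 1) % 4
--         i = r + (1 if d == 1 else (-1 if d == 3 else 0))
--         j = c + (1 if d == 0 else (-1 if d == 2 else 0))
-- ===== Notes on version B (the rewrite author's own statement) =====
-- stated objective: alternative
-- what changed: A walks the grid cell by cell, reading and mutating the matrix at every step; B precomputes per-row and per-column ascending index lists of the 1-cells and then jumps directly to the next 1 ahead in the current direction (first >= / last <= lookup in the relevant list), removing it from both lists at each turn - there is no per-cell walk and the matrix is never touched after the build.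
-- outside the precondition, e.g. on endPoints([[0], [], []], 3, 1): A returns (0, 0), B raises IndexError
import Mathlib
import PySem

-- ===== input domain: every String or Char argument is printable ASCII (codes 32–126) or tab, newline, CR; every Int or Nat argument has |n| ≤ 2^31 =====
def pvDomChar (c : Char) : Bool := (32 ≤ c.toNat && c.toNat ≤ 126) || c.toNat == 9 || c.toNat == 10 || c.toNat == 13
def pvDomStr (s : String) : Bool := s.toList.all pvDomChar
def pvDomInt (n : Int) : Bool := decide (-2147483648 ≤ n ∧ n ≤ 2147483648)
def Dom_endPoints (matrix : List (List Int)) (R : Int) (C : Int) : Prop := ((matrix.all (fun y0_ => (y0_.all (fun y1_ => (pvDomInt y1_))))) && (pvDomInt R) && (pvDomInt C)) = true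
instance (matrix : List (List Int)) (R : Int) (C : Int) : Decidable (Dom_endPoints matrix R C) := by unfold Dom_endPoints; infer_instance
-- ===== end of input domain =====

-- B replaces A's cell-by-cell walk over a mutated matrix by jumps over precomputed per-row /
-- per-column ascending index lists of the 1-cells; equivalence is about the RETURN value only
-- (A mutates `matrix` in place, B does not).

-- ===== PORT A =====
-- termination helpers for the A-side loop (cited in decreasing_by)
def pvCountOnes (m : List (List Int)) : Nat := (m.map (fun row => row.count 1)).sum

def pvDist (R C d i j : Int) : Nat :=
  if d = 0 then (C - j).toNat else if d = 1 then (R - i).toNat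
  else if d = 2 then (j + 1).toNat else (i + 1).toNat

lemma pv_sum_set_lt (l : List Nat) (n : Nat) (v : Nat) (h : n < l.length) (hv : v < l[n]) :
    (l.set n v).sum < l.sum := by
  induction l generalizing n with
  | nil => simp at h
  | cons x xs ih =>
    cases n with
    | zero => simp at hv ⊢; omega
    | succ k =>
      simp only [List.set_cons_succ, List.sum_cons]
      have := ih k (by simpa using h) (by simpa using hv)
      omega

lemma pv_count_set_lt (row : List Int) (n : Nat) (h : n < row.length) (h1 : row[n] = 1) :
    (row.set n 0).count 1 < row.count 1 := by
  induction row generalizing n with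
  | nil => simp at h
  | cons x xs ih =>
    cases n with
    | zero =>
      simp only [List.getElem_cons_zero] at h1; subst h1
      simp
    | succ k =>
      simp only [List.set_cons_succ, List.count_cons]
      have := ih k (by simpa using h) (by simpa using h1)
      omega

lemma pvCountOnes_lt (m : List (List Int)) (i j : Int) (h0i : 0 ≤ i) (h0j : 0 ≤ j)
    (hc : PySem.List.pyGetD (PySem.List.pyGetD m i []) j 0 = 1) :
    pvCountOnes (PySem.List.pySetD m i (PySem.List.pySetD (PySem.List.pyGetD m i []) j 0)) <
      pvCountOnes m := by
  rw [← Int.toNat_of_nonneg h0i, ← Int.toNat_of_nonneg h0j] at hc ⊢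
  rw [PySem.List.pyGetD_natCast] at hc ⊢
  rw [PySem.List.pySetD_natCast, PySem.List.pySetD_natCast]
  rw [PySem.List.pyGetD_natCast] at hc
  -- the read cell is a real in-range cell holding 1
  have hi : i.toNat < m.length := by
    by_contra hge
    have hrow : m.getD i.toNat [] = [] := List.getD_eq_default _ _ (by omega)
    rw [hrow] at hc
    simp at hc
  rw [List.getD_eq_getElem _ _ hi] at hc ⊢
  have hj : j.toNat < m[i.toNat].length := by
    by_contra hge
    rw [List.getD_eq_default _ _ (by omega)] at hc
    simp at hc
  rw [List.getD_eq_getElem _ _ hj] at hc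
  unfold pvCountOnes
  rw [List.map_set]
  refine pv_sum_set_lt _ _ _ (by simpa using hi) ?_
  rw [List.getElem_map]
  exact pv_count_set_lt _ _ hj hc

-- the move if-chain of A's loop body (i/j updated according to d); the final arm is
-- unreachable for d ∉ {0,1,2,3}
def pvMove (d i j : Int) : Int × Int :=
  if d = 0 then (i, j + 1) else if d = 1 then (i + 1, j)
  else if d = 2 then (i, j - 1) else (i - 1, j)

lemma pv_move_dec (R C d i j : Int) (h : 0 ≤ i ∧ i < R ∧ 0 ≤ j ∧ j < C) :
    pvDist R C d (pvMove d i j).1 (pvMove d i j).2 < pvDist R C d i j := by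
  simp only [pvMove, pvDist]
  split_ifs <;> simp <;> omega

-- literal port of A's while-loop (state: matrix, i, j, d); the final `else` arms are unreachable
-- for d ∉ {0,1,2,3} (d stays in [0,4)); out-of-range reads use the total pyGetD/pySetD forms,
-- exact under Pre_endPoints
def endPointsLoop (R C : Int) (m : List (List Int)) (i j d : Int) : Int × Int :=
  if h : 0 ≤ i ∧ i < R ∧ 0 ≤ j ∧ j < C then
    if hc : PySem.List.pyGetD (PySem.List.pyGetD m i []) j 0 = 1 then
      let m' := PySem.List.pySetD m i (PySem.List.pySetD (PySem.List.pyGetD m i []) j 0)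
      let d' := PySem.Int.mod (d + 1) 4
      endPointsLoop R C m' (pvMove d' i j).1 (pvMove d' i j).2 d'
    else
      endPointsLoop R C m (pvMove d i j).1 (pvMove d i j).2 d
  else
    if d = 0 then (i, j - 1)
    else if d = 1 then (i - 1, j)
    else if d = 2 then (i, j + 1)
    else if d = 3 then (i + 1, j)
    else (i, j)
termination_by (pvCountOnes m, pvDist R C d i j)
decreasing_by
  · exact Prod.Lex.left _ _ (pvCountOnes_lt m i j h.1 h.2.2.1 hc)
  · exact Prod.Lex.right _ (pv_move_dec R C d i j h)

def endPoints (matrix : List (List Int)) (R : Int) (C : Int) : Int × Int :=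
  endPointsLoop R C matrix 0 0 0

-- ===== PORT B =====
-- first element ≥ x of an ascending list (Source B's _first_ge)
def pvFirstGe (lst : List Int) (x : Int) : Option Int :=
  match lst with
  | [] => none
  | v :: rest => if x ≤ v then some v else pvFirstGe rest x

-- last element ≤ x of an ascending list, accumulator form of Source B's _last_le break-loop
def pvLastLe (lst : List Int) (x : Int) (res : Option Int) : Option Int :=
  match lst with
  | [] => res
  | v :: rest => if x < v then res else pvLastLe rest x (some v)

-- the per-direction single-coordinate steps (Source B's conditional expressions after the turn)
def pvStepI (d : Int) : Int := if d = 1 then 1 else if d = 3 then -1 else 0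
def pvStepJ (d : Int) : Int := if d = 0 then 1 else if d = 2 then -1 else 0

-- `rows[r].remove(c)` — erase one occurrence from the list stored at index r
def pvConsume (rows : List (List Int)) (r c : Int) : List (List Int) :=
  PySem.List.pySetD rows r ((PySem.List.pyGetD rows r []).erase c)

-- termination measure: total number of indices still stored
def pvSum2 (rows cols : List (List Int)) : Nat :=
  (rows.map List.length).sum + (cols.map List.length).sum

-- the if/elif chain of Source B's loop body: (target 1-cell ahead or none, exit cell if none)
def pvTE (R C : Int) (rows cols : List (List Int)) (i j d : Int) :
    Option (Int × Int) × (Int × Int) :=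
  if d = 0 then (Option.map (fun c => (i, c)) (pvFirstGe (PySem.List.pyGetD rows i []) j), (i, C - 1))
  else if d = 1 then (Option.map (fun r => (r, j)) (pvFirstGe (PySem.List.pyGetD cols j []) i), (R - 1, j))
  else if d = 2 then (Option.map (fun c => (i, c)) (pvLastLe (PySem.List.pyGetD rows i []) j none), (i, 0))
  else (Option.map (fun r => (r, j)) (pvLastLe (PySem.List.pyGetD cols j []) i none), (0, j))

-- Source B's while-loop: jump to the next 1 ahead, or exit at the boundary cell.  Python's
-- list.remove would raise ValueError on a missing element; the guard makes the same
-- computation total (it always holds on states reached from inputs admitted by Pre_).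
def pvWalkB (R C : Int) (rows cols : List (List Int)) (i j d : Int) : Int × Int :=
  match (pvTE R C rows cols i j d).1 with
  | none => (pvTE R C rows cols i j d).2
  | some (r, c) =>
    if h : pvSum2 (pvConsume rows r c) (pvConsume cols c r) < pvSum2 rows cols then
      pvWalkB R C (pvConsume rows r c) (pvConsume cols c r)
        (r + pvStepI (PySem.Int.mod (d + 1) 4)) (c + pvStepJ (PySem.Int.mod (d + 1) 4))
        (PySem.Int.mod (d + 1) 4)
    else (pvTE R C rows cols i j d).2
termination_by pvSum2 rows cols
decreasing_by exact h

def endPoints_alt (matrix : List (List Int)) (R : Int) (C : Int) : Int × Int :=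
  if R ≤ 0 ∨ C ≤ 0 then (0, -1)
  else
    pvWalkB R C
      ((PySem.List.pyRange 0 R 1).map (fun r => (PySem.List.pyRange 0 C 1).filter
        (fun c => PySem.List.pyGetD (PySem.List.pyGetD matrix r []) c 0 == 1)))
      ((PySem.List.pyRange 0 C 1).map (fun c => (PySem.List.pyRange 0 R 1).filter
        (fun r => PySem.List.pyGetD (PySem.List.pyGetD matrix r []) c 0 == 1)))
      0 0 0

-- ===== PRECONDITION & SPEC =====
-- Pre_ excludes (for R, C > 0) matrices that do not cover the full R×C grid: A's unguarded
-- matrix[i][j] reads can raise IndexError there (on some such ragged inputs A happens to exit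
-- before touching a missing cell and returns; those are excluded too — see claim cites), and
-- B's build of the index lists reads every grid cell and raises IndexError there as well.
def Pre_endPoints (matrix : List (List Int)) (R : Int) (C : Int) : Prop :=
  0 < R → 0 < C →
    R ≤ (matrix.length : Int) ∧ ∀ row ∈ matrix.take R.toNat, C ≤ (row.length : Int)
instance (matrix : List (List Int)) (R : Int) (C : Int) : Decidable (Pre_endPoints matrix R C) := by
  unfold Pre_endPoints; infer_instance

def pvWitness_endPoints : List (List Int) × Int × Int := ([[1, 0], [0, 1]], 2, 2)

def Spec_endPoints (matrix : List (List Int)) (R : Int) (C : Int) (out : Int × Int) : Prop := out = endPoints_alt matrix R C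
instance (matrix : List (List Int)) (R : Int) (C : Int) (out : Int × Int) : Decidable (Spec_endPoints matrix R C out) := by unfold Spec_endPoints; infer_instance

-- ===== CLAIM (what is proved, stated in full; the proofs are below) =====
def Claim_equal_endPoints : Prop := ∀ (matrix : List (List Int)) (R : Int) (C : Int), Dom_endPoints matrix R C → Pre_endPoints matrix R C → Spec_endPoints matrix R C (endPoints matrix R C)

-- ===== LEMMAS AND PROOFS =====

lemma pv_pyGetD_nonneg {α : Type} (xs : List α) (i : Int) (dflt : α) (h : 0 ≤ i) :
    PySem.List.pyGetD xs i dflt = xs.getD i.toNat dflt := by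
  conv_lhs => rw [← Int.toNat_of_nonneg h]
  exact PySem.List.pyGetD_natCast ..

lemma pv_getD_set {α : Type} (l : List α) (n k : Nat) (v d : α) (hn : n < l.length) :
    (l.set n v).getD k d = if k = n then v else l.getD k d := by
  simp only [List.getD_eq_getElem?_getD, List.getElem?_set]
  by_cases h : n = k
  · subst h; simp [hn]
  · rw [if_neg h, if_neg (fun hh => h hh.symm)]

lemma pv_cell_inrange (m : List (List Int)) (i j : Int) (h0i : 0 ≤ i) (h0j : 0 ≤ j)
    (hc : PySem.List.pyGetD (PySem.List.pyGetD m i []) j 0 = 1) :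
    i.toNat < m.length ∧ j.toNat < (m.getD i.toNat []).length := by
  rw [pv_pyGetD_nonneg _ _ _ h0i, pv_pyGetD_nonneg _ _ _ h0j] at hc
  constructor
  · by_contra hge
    have hrow : m.getD i.toNat [] = [] := List.getD_eq_default _ _ (by omega)
    rw [hrow] at hc; simp at hc
  · by_contra hge
    rw [List.getD_eq_default _ _ (by omega)] at hc; simp at hc

lemma pv_cell_set (m : List (List Int)) (i j r c : Int) (h0i : 0 ≤ i) (h0j : 0 ≤ j)
    (h0r : 0 ≤ r) (h0c : 0 ≤ c)
    (hc : PySem.List.pyGetD (PySem.List.pyGetD m i []) j 0 = 1) :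
    PySem.List.pyGetD (PySem.List.pyGetD
        (PySem.List.pySetD m i (PySem.List.pySetD (PySem.List.pyGetD m i []) j 0)) r []) c 0
      = if r = i ∧ c = j then 0 else PySem.List.pyGetD (PySem.List.pyGetD m r []) c 0 := by
  obtain ⟨hi, hj⟩ := pv_cell_inrange m i j h0i h0j hc
  have e1 : ∀ (xs : List (List Int)), PySem.List.pyGetD xs r [] = xs.getD r.toNat [] :=
    fun xs => pv_pyGetD_nonneg xs r [] h0r
  have e2 : ∀ (xs : List Int), PySem.List.pyGetD xs c 0 = xs.getD c.toNat 0 :=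
    fun xs => pv_pyGetD_nonneg xs c 0 h0c
  rw [PySem.List.pySetD_of_nonneg _ _ h0i, PySem.List.pySetD_of_nonneg _ _ h0j,
    pv_pyGetD_nonneg m i [] h0i, e1, e1, e2, e2]
  rw [pv_getD_set m i.toNat r.toNat _ [] hi]
  by_cases hri : r = i
  · subst hri
    rw [if_pos (by omega), pv_getD_set _ j.toNat c.toNat 0 0 hj]
    by_cases hcj : c = j
    · subst hcj
      rw [if_pos (by omega), if_pos ⟨rfl, rfl⟩]
    · rw [if_neg (by omega), if_neg (by tauto)]
  · rw [if_neg (by omega), if_neg (by tauto)]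

-- ---- properties of the two searches ----

lemma pvFirstGe_none (lst : List Int) (x : Int) (h : ∀ y ∈ lst, y < x) :
    pvFirstGe lst x = none := by
  induction lst with
  | nil => rfl
  | cons v rest ih =>
    rw [pvFirstGe, if_neg (by have := h v (by simp); omega)]
    exact ih (fun y hy => h y (by simp [hy]))

lemma pvFirstGe_step (lst : List Int) (x : Int) (h : x ∉ lst) :
    pvFirstGe lst x = pvFirstGe lst (x + 1) := by
  induction lst with
  | nil => rfl
  | cons v rest ih =>
    have hvx : v ≠ x := fun hh => h (by simp [hh])
    rw [pvFirstGe, pvFirstGe]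
    by_cases hx : x ≤ v
    · rw [if_pos hx, if_pos (by omega)]
    · rw [if_neg hx, if_neg (by omega)]
      exact ih (fun hh => h (by simp [hh]))

lemma pvFirstGe_hit (lst : List Int) (x : Int) (hs : lst.Pairwise (· < ·)) (h : x ∈ lst) :
    pvFirstGe lst x = some x := by
  induction lst with
  | nil => simp at h
  | cons v rest ih =>
    rw [List.pairwise_cons] at hs
    rcases List.mem_cons.mp h with rfl | hrest
    · rw [pvFirstGe, if_pos le_rfl]
    · have hvx : v < x := hs.1 x hrest
      rw [pvFirstGe, if_neg (by omega)]
      exact ih hs.2 hrest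

lemma pvLastLe_stop (lst : List Int) (x : Int) (acc : Option Int) (h : ∀ y ∈ lst, x < y) :
    pvLastLe lst x acc = acc := by
  cases lst with
  | nil => rfl
  | cons v rest => rw [pvLastLe, if_pos (h v (by simp))]

lemma pvLastLe_step (lst : List Int) (x : Int) (acc : Option Int) (h : x ∉ lst) :
    pvLastLe lst x acc = pvLastLe lst (x - 1) acc := by
  induction lst generalizing acc with
  | nil => rfl
  | cons v rest ih =>
    have hvx : v ≠ x := fun hh => h (by simp [hh])
    rw [pvLastLe, pvLastLe]
    by_cases hx : x < v
    · rw [if_pos hx, if_pos (by omega)]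
    · rw [if_neg hx, if_neg (by omega)]
      exact ih _ (fun hh => h (by simp [hh]))

lemma pvLastLe_hit (lst : List Int) (x : Int) (acc : Option Int)
    (hs : lst.Pairwise (· < ·)) (h : x ∈ lst) :
    pvLastLe lst x acc = some x := by
  induction lst generalizing acc with
  | nil => simp at h
  | cons v rest ih =>
    rw [List.pairwise_cons] at hs
    rcases List.mem_cons.mp h with rfl | hrest
    · rw [pvLastLe, if_neg (by omega)]
      exact pvLastLe_stop rest x (some x) hs.1
    · have hvx : v < x := hs.1 x hrest
      rw [pvLastLe, if_neg (by omega)]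
      exact ih _ hs.2 hrest

-- erasing a kept element from a filtered nodup list = filtering with the element forbidden
lemma pv_filter_erase (l : List Int) (j : Int) (p : Int → Bool)
    (hnd : l.Nodup) (hpj : p j = true) :
    l.filter (fun c => !(c == j) && p c) = (l.filter p).erase j := by
  induction l with
  | nil => rfl
  | cons v rest ih =>
    rw [List.nodup_cons] at hnd
    by_cases hvj : v = j
    · subst hvj
      rw [List.filter_cons_of_neg (by simp), List.filter_cons_of_pos (by simp [hpj]),
        List.erase_cons_head]
      apply List.filter_congr
      intro c hc
      have hcv : (c == v) = false := beq_eq_false_iff_ne.mpr (fun hh => hnd.1 (hh ▸ hc))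
      simp [hcv]
    · have hbeq : (v == j) = false := beq_eq_false_iff_ne.mpr hvj
      by_cases hpv : p v = true
      · rw [List.filter_cons_of_pos (by simp [hbeq, hpv]), List.filter_cons_of_pos hpv,
          List.erase_cons_tail (by simp [hvj]), ih hnd.2]
      · rw [List.filter_cons_of_neg (by simp [hbeq, hpv]),
          List.filter_cons_of_neg (by simp [hpv]), ih hnd.2]

-- ---- the walk invariants ----

def pvRowInv (m rows : List (List Int)) (R C : Int) : Prop :=
  ∀ k : Nat, k < R.toNat → rows.getD k [] =
    (PySem.List.pyRange 0 C 1).filter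
      (fun c => PySem.List.pyGetD (PySem.List.pyGetD m (k : Int) []) c 0 == 1)

def pvColInv (m cols : List (List Int)) (R C : Int) : Prop :=
  ∀ k : Nat, k < C.toNat → cols.getD k [] =
    (PySem.List.pyRange 0 R 1).filter
      (fun r => PySem.List.pyGetD (PySem.List.pyGetD m r []) (k : Int) 0 == 1)

-- reachable states of the two walks
def pvStateOK (R C d i j : Int) : Prop :=
  (d = 0 ∧ 0 ≤ i ∧ i < R ∧ 0 ≤ j ∧ j ≤ C) ∨
  (d = 1 ∧ 0 ≤ j ∧ j < C ∧ 0 ≤ i ∧ i ≤ R) ∨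
  (d = 2 ∧ 0 ≤ i ∧ i < R ∧ -1 ≤ j ∧ j < C) ∨
  (d = 3 ∧ 0 ≤ j ∧ j < C ∧ -1 ≤ i ∧ i < R)

lemma pv_row_lst (m rows : List (List Int)) (R C i : Int)
    (hri : pvRowInv m rows R C) (h0 : 0 ≤ i) (hR : i < R) :
    PySem.List.pyGetD rows i [] =
      (PySem.List.pyRange 0 C 1).filter
        (fun c => PySem.List.pyGetD (PySem.List.pyGetD m i []) c 0 == 1) := by
  rw [pv_pyGetD_nonneg _ _ _ h0, hri i.toNat (by omega), Int.toNat_of_nonneg h0]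

lemma pv_col_lst (m cols : List (List Int)) (R C j : Int)
    (hci : pvColInv m cols R C) (h0 : 0 ≤ j) (hC : j < C) :
    PySem.List.pyGetD cols j [] =
      (PySem.List.pyRange 0 R 1).filter
        (fun r => PySem.List.pyGetD (PySem.List.pyGetD m r []) j 0 == 1) := by
  rw [pv_pyGetD_nonneg _ _ _ h0, hci j.toNat (by omega), Int.toNat_of_nonneg h0]

lemma pvWalkB_none (R C : Int) (rows cols : List (List Int)) (i j d : Int)
    (hnone : (pvTE R C rows cols i j d).1 = none) :
    pvWalkB R C rows cols i j d = (pvTE R C rows cols i j d).2 := by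
  rw [pvWalkB.eq_def, hnone]

lemma pvWalkB_some (R C : Int) (rows cols : List (List Int)) (i j d r c : Int)
    (hsome : (pvTE R C rows cols i j d).1 = some (r, c))
    (hlt : pvSum2 (pvConsume rows r c) (pvConsume cols c r) < pvSum2 rows cols) :
    pvWalkB R C rows cols i j d =
      pvWalkB R C (pvConsume rows r c) (pvConsume cols c r)
        (r + pvStepI (PySem.Int.mod (d + 1) 4)) (c + pvStepJ (PySem.Int.mod (d + 1) 4))
        (PySem.Int.mod (d + 1) 4) := by
  rw [pvWalkB.eq_def, hsome]
  simp only [dif_pos hlt]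

lemma pvWalkB_congr_te (R C : Int) (rows cols : List (List Int)) (i j i' j' d : Int)
    (hte : pvTE R C rows cols i j d = pvTE R C rows cols i' j' d) :
    pvWalkB R C rows cols i j d = pvWalkB R C rows cols i' j' d := by
  rw [pvWalkB.eq_def, hte, pvWalkB.eq_def]

-- per-direction evaluation of the if/elif chain
lemma pvTE_0 (R C : Int) (rows cols : List (List Int)) (i j : Int) :
    pvTE R C rows cols i j 0 =
      (Option.map (fun c => (i, c)) (pvFirstGe (PySem.List.pyGetD rows i []) j), (i, C - 1)) := by
  simp [pvTE]

lemma pvTE_1 (R C : Int) (rows cols : List (List Int)) (i j : Int) :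
    pvTE R C rows cols i j 1 =
      (Option.map (fun r => (r, j)) (pvFirstGe (PySem.List.pyGetD cols j []) i), (R - 1, j)) := by
  norm_num [pvTE]

lemma pvTE_2 (R C : Int) (rows cols : List (List Int)) (i j : Int) :
    pvTE R C rows cols i j 2 =
      (Option.map (fun c => (i, c)) (pvLastLe (PySem.List.pyGetD rows i []) j none), (i, 0)) := by
  norm_num [pvTE]

lemma pvTE_3 (R C : Int) (rows cols : List (List Int)) (i j : Int) :
    pvTE R C rows cols i j 3 =
      (Option.map (fun r => (r, j)) (pvLastLe (PySem.List.pyGetD cols j []) i none), (0, j)) := by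
  norm_num [pvTE]

-- the consumed cell makes both index sums strictly smaller
lemma pv_sum2_lt (rows cols : List (List Int)) (R C i j : Int)
    (h0i : 0 ≤ i) (hiR : i < R) (h0j : 0 ≤ j) (hjC : j < C)
    (hrl : rows.length = R.toNat) (hcl : cols.length = C.toNat)
    (hmr : j ∈ PySem.List.pyGetD rows i []) (hmc : i ∈ PySem.List.pyGetD cols j []) :
    pvSum2 (pvConsume rows i j) (pvConsume cols j i) < pvSum2 rows cols := by
  have h1 : i.toNat < rows.length := by omega
  have h2 : j.toNat < cols.length := by omega
  have e1 : PySem.List.pyGetD rows i [] = rows[i.toNat] := by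
    rw [pv_pyGetD_nonneg _ _ _ h0i, List.getD_eq_getElem _ _ h1]
  have e2 : PySem.List.pyGetD cols j [] = cols[j.toNat] := by
    rw [pv_pyGetD_nonneg _ _ _ h0j, List.getD_eq_getElem _ _ h2]
  have hmr' : j ∈ rows[i.toNat] := e1 ▸ hmr
  have hmc' : i ∈ cols[j.toNat] := e2 ▸ hmc
  have l1 : ((PySem.List.pyGetD rows i []).erase j).length <
      (rows.map List.length)[i.toNat]'(by simpa using h1) := by
    rw [e1, List.getElem_map, List.length_erase_of_mem hmr']
    have := List.length_pos_of_mem hmr'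
    omega
  have l2 : ((PySem.List.pyGetD cols j []).erase i).length <
      (cols.map List.length)[j.toNat]'(by simpa using h2) := by
    rw [e2, List.getElem_map, List.length_erase_of_mem hmc']
    have := List.length_pos_of_mem hmc'
    omega
  have s1 := pv_sum_set_lt (rows.map List.length) i.toNat _ (by simpa using h1) l1
  have s2 := pv_sum_set_lt (cols.map List.length) j.toNat _ (by simpa using h2) l2
  unfold pvSum2 pvConsume
  rw [PySem.List.pySetD_of_nonneg _ _ h0i, PySem.List.pySetD_of_nonneg _ _ h0j,
    List.map_set, List.map_set]
  omega

-- consuming the turned-on cell keeps the row-list invariant for the zeroed matrix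
lemma pv_rows_after (m rows : List (List Int)) (R C i j : Int)
    (h0i : 0 ≤ i) (hiR : i < R) (h0j : 0 ≤ j) (hjC : j < C)
    (hc : PySem.List.pyGetD (PySem.List.pyGetD m i []) j 0 = 1)
    (hrl : rows.length = R.toNat) (hri : pvRowInv m rows R C) :
    pvRowInv (PySem.List.pySetD m i (PySem.List.pySetD (PySem.List.pyGetD m i []) j 0))
      (pvConsume rows i j) R C := by
  intro k hk
  have h1 : i.toNat < rows.length := by omega
  rw [pvConsume, PySem.List.pySetD_of_nonneg _ _ h0i, pv_getD_set rows i.toNat k _ [] h1]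
  by_cases hki : k = i.toNat
  · rw [if_pos hki]
    have hcast : (k : Int) = i := by omega
    rw [pv_row_lst m rows R C i hri h0i hiR, hcast]
    rw [← pv_filter_erase _ j _ (PySem.List.nodup_pyRange_one ..) (by simp [hc])]
    apply List.filter_congr
    intro c hcm
    have h0c : 0 ≤ c := ((PySem.List.mem_pyRange_one ..).mp hcm).1
    rw [pv_cell_set m i j i c h0i h0j h0i h0c hc]
    by_cases hcj : c = j
    · subst hcj; rw [if_pos ⟨rfl, rfl⟩]; simp
    · rw [if_neg (by tauto)]; simp [hcj]
  · rw [if_neg hki, hri k hk]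
    apply List.filter_congr
    intro c hcm
    have h0c : 0 ≤ c := ((PySem.List.mem_pyRange_one ..).mp hcm).1
    rw [pv_cell_set m i j (k : Int) c h0i h0j (Int.natCast_nonneg k) h0c hc]
    rw [if_neg (by rintro ⟨hh, -⟩; exact hki (by omega))]

-- and the column-list invariant
lemma pv_cols_after (m cols : List (List Int)) (R C i j : Int)
    (h0i : 0 ≤ i) (hiR : i < R) (h0j : 0 ≤ j) (hjC : j < C)
    (hc : PySem.List.pyGetD (PySem.List.pyGetD m i []) j 0 = 1)
    (hcl : cols.length = C.toNat) (hci : pvColInv m cols R C) :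
    pvColInv (PySem.List.pySetD m i (PySem.List.pySetD (PySem.List.pyGetD m i []) j 0))
      (pvConsume cols j i) R C := by
  intro k hk
  have h2 : j.toNat < cols.length := by omega
  rw [pvConsume, PySem.List.pySetD_of_nonneg _ _ h0j, pv_getD_set cols j.toNat k _ [] h2]
  by_cases hkj : k = j.toNat
  · rw [if_pos hkj]
    have hcast : (k : Int) = j := by omega
    rw [pv_col_lst m cols R C j hci h0j hjC, hcast]
    rw [← pv_filter_erase _ i _ (PySem.List.nodup_pyRange_one ..) (by simp [hc])]
    apply List.filter_congr
    intro r hrm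
    have h0r : 0 ≤ r := ((PySem.List.mem_pyRange_one ..).mp hrm).1
    rw [pv_cell_set m i j r j h0i h0j h0r h0j hc]
    by_cases hre : r = i
    · subst hre; rw [if_pos ⟨rfl, rfl⟩]; simp
    · rw [if_neg (by tauto)]; simp [hre]
  · rw [if_neg hkj, hci k hk]
    apply List.filter_congr
    intro r hrm
    have h0r : 0 ≤ r := ((PySem.List.mem_pyRange_one ..).mp hrm).1
    rw [pv_cell_set m i j r (k : Int) h0i h0j h0r (Int.natCast_nonneg k) hc]
    rw [if_neg (by rintro ⟨-, hh⟩; exact hkj (by omega))]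

-- the main step lemma: A's walk equals B's jump walk under the index-list invariants
lemma pv_walkB_eq (R C : Int) :
    ∀ (m rows cols : List (List Int)) (i j d : Int),
      pvStateOK R C d i j →
      rows.length = R.toNat → cols.length = C.toNat →
      pvRowInv m rows R C → pvColInv m cols R C →
      endPointsLoop R C m i j d = pvWalkB R C rows cols i j d := by
  suffices H : ∀ (n k : Nat) (m rows cols : List (List Int)) (i j d : Int),
      pvCountOnes m = n → pvDist R C d i j = k →
      pvStateOK R C d i j →
      rows.length = R.toNat → cols.length = C.toNat →
      pvRowInv m rows R C → pvColInv m cols R C →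
      endPointsLoop R C m i j d = pvWalkB R C rows cols i j d by
    intro m rows cols i j d h1 h2 h3 h4 h5
    exact H _ _ m rows cols i j d rfl rfl h1 h2 h3 h4 h5
  intro n
  induction n using Nat.strong_induction_on with
  | _ n ihn =>
    intro k
    induction k using Nat.strong_induction_on with
    | _ k ihk =>
      intro m rows cols i j d hcnt hdist hok hrl hcl hri hci
      by_cases hbnd : 0 ≤ i ∧ i < R ∧ 0 ≤ j ∧ j < C
      · obtain ⟨h0i, hiR, h0j, hjC⟩ := hbnd
        have hbnd' : 0 ≤ i ∧ i < R ∧ 0 ≤ j ∧ j < C := ⟨h0i, hiR, h0j, hjC⟩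
        have hrlst := pv_row_lst m rows R C i hri h0i hiR
        have hclst := pv_col_lst m cols R C j hci h0j hjC
        by_cases hc : PySem.List.pyGetD (PySem.List.pyGetD m i []) j 0 = 1
        · -- turn: B's search finds exactly the cell A turns on
          have hmr : j ∈ PySem.List.pyGetD rows i [] := by
            rw [hrlst, List.mem_filter]
            exact ⟨(PySem.List.mem_pyRange_one ..).mpr ⟨h0j, hjC⟩, by simp [hc]⟩
          have hmc : i ∈ PySem.List.pyGetD cols j [] := by
            rw [hclst, List.mem_filter]
            exact ⟨(PySem.List.mem_pyRange_one ..).mpr ⟨h0i, hiR⟩, by simp [hc]⟩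
          have hpr : (PySem.List.pyGetD rows i []).Pairwise (· < ·) := by
            rw [hrlst]; exact (PySem.List.pairwise_lt_pyRange_one ..).filter _
          have hpc : (PySem.List.pyGetD cols j []).Pairwise (· < ·) := by
            rw [hclst]; exact (PySem.List.pairwise_lt_pyRange_one ..).filter _
          have hlt := pv_sum2_lt rows cols R C i j h0i hiR h0j hjC hrl hcl hmr hmc
          have hrl' : (pvConsume rows i j).length = R.toNat := by
            rw [pvConsume, PySem.List.pySetD_of_nonneg _ _ h0i, List.length_set]; exact hrl
          have hcl' : (pvConsume cols j i).length = C.toNat := by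
            rw [pvConsume, PySem.List.pySetD_of_nonneg _ _ h0j, List.length_set]; exact hcl
          have hri' := pv_rows_after m rows R C i j h0i hiR h0j hjC hc hrl hri
          have hci' := pv_cols_after m cols R C i j h0i hiR h0j hjC hc hcl hci
          have hcnt' : pvCountOnes
              (PySem.List.pySetD m i (PySem.List.pySetD (PySem.List.pyGetD m i []) j 0)) < n :=
            hcnt ▸ pvCountOnes_lt m i j h0i h0j hc
          rcases hok with ⟨rfl, -, -, -, -⟩ | ⟨rfl, -, -, -, -⟩ | ⟨rfl, -, -, -, -⟩ | ⟨rfl, -, -, -, -⟩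
          · -- d = 0 → d' = 1
            rw [endPointsLoop, dif_pos hbnd', dif_pos hc]
            have hsome : (pvTE R C rows cols i j 0).1 = some (i, j) := by
              rw [pvTE_0]; rw [pvFirstGe_hit _ _ hpr hmr]; rfl
            rw [pvWalkB_some R C rows cols i j 0 i j hsome hlt]
            have e1 : PySem.Int.mod ((0 : Int) + 1) 4 = 1 := by decide
            simp only [e1, pvMove, pvStepI, pvStepJ]
            norm_num
            exact ihn _ hcnt' _ _ _ _ (i + 1) j 1 rfl rfl
              (Or.inr (Or.inl ⟨rfl, h0j, hjC, by omega, by omega⟩)) hrl' hcl' hri' hci'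
          · -- d = 1 → d' = 2
            rw [endPointsLoop, dif_pos hbnd', dif_pos hc]
            have hsome : (pvTE R C rows cols i j 1).1 = some (i, j) := by
              rw [pvTE_1]; rw [pvFirstGe_hit _ _ hpc hmc]; rfl
            rw [pvWalkB_some R C rows cols i j 1 i j hsome hlt]
            have e1 : PySem.Int.mod ((1 : Int) + 1) 4 = 2 := by decide
            simp only [e1, pvMove, pvStepI, pvStepJ]
            norm_num
            exact ihn _ hcnt' _ _ _ _ i (j - 1) 2 rfl rfl
              (Or.inr (Or.inr (Or.inl ⟨rfl, h0i, hiR, by omega, by omega⟩))) hrl' hcl' hri' hci'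
          · -- d = 2 → d' = 3
            rw [endPointsLoop, dif_pos hbnd', dif_pos hc]
            have hsome : (pvTE R C rows cols i j 2).1 = some (i, j) := by
              rw [pvTE_2]; rw [pvLastLe_hit _ _ _ hpr hmr]; rfl
            rw [pvWalkB_some R C rows cols i j 2 i j hsome hlt]
            have e1 : PySem.Int.mod ((2 : Int) + 1) 4 = 3 := by decide
            simp only [e1, pvMove, pvStepI, pvStepJ]
            norm_num
            exact ihn _ hcnt' _ _ _ _ (i - 1) j 3 rfl rfl
              (Or.inr (Or.inr (Or.inr ⟨rfl, h0j, hjC, by omega, by omega⟩))) hrl' hcl' hri' hci'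
          · -- d = 3 → d' = 0
            rw [endPointsLoop, dif_pos hbnd', dif_pos hc]
            have hsome : (pvTE R C rows cols i j 3).1 = some (i, j) := by
              rw [pvTE_3]; rw [pvLastLe_hit _ _ _ hpc hmc]; rfl
            rw [pvWalkB_some R C rows cols i j 3 i j hsome hlt]
            have e1 : PySem.Int.mod ((3 : Int) + 1) 4 = 0 := by decide
            simp only [e1, pvMove, pvStepI, pvStepJ]
            norm_num
            exact ihn _ hcnt' _ _ _ _ i (j + 1) 0 rfl rfl
              (Or.inl ⟨rfl, h0i, hiR, by omega, by omega⟩) hrl' hcl' hri' hci'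
        · -- no turn: the current cell is not in the index lists, B's search is unchanged
          have hnr : j ∉ PySem.List.pyGetD rows i [] := by
            rw [hrlst, List.mem_filter]
            rintro ⟨-, hpred⟩; exact hc (by simpa using hpred)
          have hnc : i ∉ PySem.List.pyGetD cols j [] := by
            rw [hclst, List.mem_filter]
            rintro ⟨-, hpred⟩; exact hc (by simpa using hpred)
          rcases hok with ⟨rfl, -, -, -, -⟩ | ⟨rfl, -, -, -, -⟩ | ⟨rfl, -, -, -, -⟩ | ⟨rfl, -, -, -, -⟩
          · -- d = 0: slide right
            rw [endPointsLoop, dif_pos hbnd', dif_neg hc]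
            have hte : pvTE R C rows cols i j 0 = pvTE R C rows cols i (j + 1) 0 := by
              rw [pvTE_0, pvTE_0, pvFirstGe_step _ _ hnr]
            rw [pvWalkB_congr_te R C rows cols i j i (j + 1) 0 hte]
            simp only [pvMove]
            norm_num
            exact ihk (pvDist R C 0 i (j + 1)) (by rw [← hdist]; simp [pvDist]; omega)
              m rows cols i (j + 1) 0 hcnt rfl
              (Or.inl ⟨rfl, h0i, hiR, by omega, by omega⟩) hrl hcl hri hci
          · -- d = 1: slide down
            rw [endPointsLoop, dif_pos hbnd', dif_neg hc]
            have hte : pvTE R C rows cols i j 1 = pvTE R C rows cols (i + 1) j 1 := by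
              rw [pvTE_1, pvTE_1, pvFirstGe_step _ _ hnc]
            rw [pvWalkB_congr_te R C rows cols i j (i + 1) j 1 hte]
            simp only [pvMove]
            norm_num
            exact ihk (pvDist R C 1 (i + 1) j) (by rw [← hdist]; simp [pvDist]; omega)
              m rows cols (i + 1) j 1 hcnt rfl
              (Or.inr (Or.inl ⟨rfl, h0j, hjC, by omega, by omega⟩)) hrl hcl hri hci
          · -- d = 2: slide left
            rw [endPointsLoop, dif_pos hbnd', dif_neg hc]
            have hte : pvTE R C rows cols i j 2 = pvTE R C rows cols i (j - 1) 2 := by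
              rw [pvTE_2, pvTE_2, pvLastLe_step _ _ _ hnr]
            rw [pvWalkB_congr_te R C rows cols i j i (j - 1) 2 hte]
            simp only [pvMove]
            norm_num
            exact ihk (pvDist R C 2 i (j - 1)) (by rw [← hdist]; simp [pvDist]; omega)
              m rows cols i (j - 1) 2 hcnt rfl
              (Or.inr (Or.inr (Or.inl ⟨rfl, h0i, hiR, by omega, by omega⟩))) hrl hcl hri hci
          · -- d = 3: slide up
            rw [endPointsLoop, dif_pos hbnd', dif_neg hc]
            have hte : pvTE R C rows cols i j 3 = pvTE R C rows cols (i - 1) j 3 := by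
              rw [pvTE_3, pvTE_3, pvLastLe_step _ _ _ hnc]
            rw [pvWalkB_congr_te R C rows cols i j (i - 1) j 3 hte]
            simp only [pvMove]
            norm_num
            exact ihk (pvDist R C 3 (i - 1) j) (by rw [← hdist]; simp [pvDist]; omega)
              m rows cols (i - 1) j 3 hcnt rfl
              (Or.inr (Or.inr (Or.inr ⟨rfl, h0j, hjC, by omega, by omega⟩))) hrl hcl hri hci
      · -- exit: A has stepped off the grid; B's search finds nothing ahead
        rcases hok with ⟨rfl, h0i, hiR, h0j, hjC⟩ | ⟨rfl, h0j, hjC, h0i, hiR⟩ |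
          ⟨rfl, h0i, hiR, hm1j, hjC⟩ | ⟨rfl, h0j, hjC, hm1i, hiR⟩
        · -- d = 0: j = C
          have hj : j = C := by
            by_contra hne; exact hbnd ⟨h0i, hiR, h0j, by omega⟩
          rw [endPointsLoop, dif_neg hbnd]
          have hnone : (pvTE R C rows cols i j 0).1 = none := by
            rw [pvTE_0]
            rw [pvFirstGe_none]
            · rfl
            · intro y hy
              rw [pv_row_lst m rows R C i hri h0i hiR, List.mem_filter] at hy
              have := ((PySem.List.mem_pyRange_one ..).mp hy.1).2
              omega
          rw [pvWalkB_none R C rows cols i j 0 hnone, pvTE_0, hj]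
          norm_num
        · -- d = 1: i = R
          have hi : i = R := by
            by_contra hne; exact hbnd ⟨h0i, by omega, h0j, hjC⟩
          rw [endPointsLoop, dif_neg hbnd]
          have hnone : (pvTE R C rows cols i j 1).1 = none := by
            rw [pvTE_1]
            rw [pvFirstGe_none]
            · rfl
            · intro y hy
              rw [pv_col_lst m cols R C j hci h0j hjC, List.mem_filter] at hy
              have := ((PySem.List.mem_pyRange_one ..).mp hy.1).2
              omega
          rw [pvWalkB_none R C rows cols i j 1 hnone, pvTE_1, hi]
          norm_num
        · -- d = 2: j = -1
          have hj : j = -1 := by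
            by_contra hne; exact hbnd ⟨h0i, hiR, by omega, hjC⟩
          rw [endPointsLoop, dif_neg hbnd]
          have hnone : (pvTE R C rows cols i j 2).1 = none := by
            rw [pvTE_2]
            rw [pvLastLe_stop]
            · rfl
            · intro y hy
              rw [pv_row_lst m rows R C i hri h0i hiR, List.mem_filter] at hy
              have := ((PySem.List.mem_pyRange_one ..).mp hy.1).1
              omega
          rw [pvWalkB_none R C rows cols i j 2 hnone, pvTE_2, hj]
          norm_num
        · -- d = 3: i = -1
          have hi : i = -1 := by
            by_contra hne; exact hbnd ⟨by omega, hiR, h0j, hjC⟩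
          rw [endPointsLoop, dif_neg hbnd]
          have hnone : (pvTE R C rows cols i j 3).1 = none := by
            rw [pvTE_3]
            rw [pvLastLe_stop]
            · rfl
            · intro y hy
              rw [pv_col_lst m cols R C j hci h0j hjC, List.mem_filter] at hy
              have := ((PySem.List.mem_pyRange_one ..).mp hy.1).1
              omega
          rw [pvWalkB_none R C rows cols i j 3 hnone, pvTE_3, hi]
          norm_num

-- ===== VERDICT (by name: the statement is the Claim_ definition above) =====
theorem endPoints_spec : Claim_equal_endPoints := by
  intro matrix R C _ _
  show endPoints matrix R C = endPoints_alt matrix R C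
  unfold endPoints endPoints_alt
  by_cases hRC : R ≤ 0 ∨ C ≤ 0
  · rw [if_pos hRC]
    rw [endPointsLoop, dif_neg (by rintro ⟨_, h1, _, h2⟩; rcases hRC with h | h <;> omega)]
    norm_num
  · rw [if_neg hRC]
    have hR0 : 0 < R := by omega
    have hC0 : 0 < C := by omega
    apply pv_walkB_eq R C matrix
    · exact Or.inl ⟨rfl, le_rfl, hR0, le_rfl, by omega⟩
    · simp [PySem.List.length_pyRange_one]
    · simp [PySem.List.length_pyRange_one]
    · intro k hk
      rw [List.getD_eq_getElem _ _ (by simp [PySem.List.length_pyRange_one]; omega),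
        List.getElem_map, PySem.List.getElem_pyRange_one]
      norm_num
    · intro k hk
      rw [List.getD_eq_getElem _ _ (by simp [PySem.List.length_pyRange_one]; omega),
        List.getElem_map, PySem.List.getElem_pyRange_one]
      norm_num
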